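-- pv_equiv track=rewrite | github.com/LilakKent/new1 | dz10.py | mainer
-- ===== SOURCE A (Python) =====
-- def mainer(sale):
--     lists = []
--     i = 0
--     count = 0
--     while i < len(sale) and count < 100:
--         sare = sale[1]
--         if sare.lower() not in ('m', 'n'):
--             lists.append(sare)
--             count += 1
--         i += 1
--     return lists
-- ===== SOURCE B (Python) =====
-- def mainer(sale):
--     # Closed form: each accepting iteration appends sale[1] and advances both
--     # i and count together, so the result is sale[1] repeated min(len(sale), 100)
--     # times (or [] when sale[1].lower() is 'm'/'n').
--     if not sale:
--         return []
--     sare = sale[1]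
--     if sare.lower() in ('m', 'n'):
--         return []
--     return [sare] * min(len(sale), 100)
-- ===== Notes on version B (the rewrite author's own statement) =====
-- stated objective: simpler
-- what changed: Replaced the while-loop with a closed form: [] when empty or sale[1].lower() is 'm'/'n', else [sale[1]] * min(len(sale), 100).
import Mathlib
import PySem

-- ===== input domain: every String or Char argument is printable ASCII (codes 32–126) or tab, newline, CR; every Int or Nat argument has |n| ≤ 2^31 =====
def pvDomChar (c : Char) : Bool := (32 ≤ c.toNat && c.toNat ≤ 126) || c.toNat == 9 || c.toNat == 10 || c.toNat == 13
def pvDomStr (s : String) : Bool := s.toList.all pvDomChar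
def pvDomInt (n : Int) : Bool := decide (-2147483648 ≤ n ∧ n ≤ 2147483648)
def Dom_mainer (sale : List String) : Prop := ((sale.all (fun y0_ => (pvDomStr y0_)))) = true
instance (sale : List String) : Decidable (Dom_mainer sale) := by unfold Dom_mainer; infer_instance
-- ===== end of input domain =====

-- B replaces A's while-loop with a closed form: sale[1] repeated min(len,100) times.


-- ===== PORT A =====
-- while i < len(sale) and count < 100: read sale[1]; if its lower() is not 'm'/'n',
-- append it and bump count; bump i.  pyGet? none (IndexError) is excluded by Pre_.
def mainerLoop (sale : List String) (i count : Nat) (lists : List String) : List String :=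
  if _h : i < sale.length ∧ count < 100 then
    match PySem.List.pyGet? sale 1 with
    | none => lists   -- IndexError in Python; outside Pre_mainer
    | some sare =>
      if PySem.Str.lower sare = "m" ∨ PySem.Str.lower sare = "n" then
        mainerLoop sale (i + 1) count lists
      else
        mainerLoop sale (i + 1) (count + 1) (lists ++ [sare])
  else lists
termination_by sale.length - i
decreasing_by all_goals omega

def mainer (sale : List String) : List String := mainerLoop sale 0 0 []

-- ===== PORT B =====
def mainer_alt (sale : List String) : List String :=
  if sale = [] then []
  else
    match PySem.List.pyGet? sale 1 with
    | none => []   -- IndexError in Python; outside Pre_mainer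
    | some sare =>
      if PySem.Str.lower sare = "m" ∨ PySem.Str.lower sare = "n" then []
      else List.replicate (min sale.length 100) sare

-- ===== PRECONDITION & SPEC =====
-- Pre_ excludes exactly the singleton lists, on which A raises IndexError at sale[1].
def Pre_mainer (sale : List String) : Prop := sale.length ≠ 1
instance (sale : List String) : Decidable (Pre_mainer sale) := by unfold Pre_mainer; infer_instance
def pvWitness_mainer : List String := ["a", "b"]

def Spec_mainer (sale : List String) (out : List String) : Prop := out = mainer_alt sale
instance (sale : List String) (out : List String) : Decidable (Spec_mainer sale out) := by unfold Spec_mainer; infer_instance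

-- ===== CLAIM (what is proved, stated in full; the proofs are below) =====
def Claim_equal_mainer : Prop := ∀ (sale : List String), Dom_mainer sale → Pre_mainer sale → Spec_mainer sale (mainer sale)

-- ===== LEMMAS AND PROOFS =====
theorem mainerLoop_skip (sale : List String) (sare : String)
    (hget : PySem.List.pyGet? sale 1 = some sare)
    (hmn : PySem.Str.lower sare = "m" ∨ PySem.Str.lower sare = "n") :
    ∀ k i count lists, sale.length - i = k →
      mainerLoop sale i count lists = lists := by
  intro k
  induction k with
  | zero =>
    intro i count lists hk
    rw [mainerLoop]
    rw [dif_neg (by omega : ¬ (i < sale.length ∧ count < 100))]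
  | succ n ih =>
    intro i count lists hk
    rw [mainerLoop]
    by_cases hc : i < sale.length ∧ count < 100
    · rw [dif_pos hc]
      simp only [hget, if_pos hmn]
      exact ih (i + 1) count lists (by omega)
    · rw [dif_neg hc]

theorem mainerLoop_acc (sale : List String) (sare : String)
    (hget : PySem.List.pyGet? sale 1 = some sare)
    (hmn : ¬ (PySem.Str.lower sare = "m" ∨ PySem.Str.lower sare = "n")) :
    ∀ k i count lists, sale.length - i = k →
      mainerLoop sale i count lists =
        lists ++ List.replicate (min (sale.length - i) (100 - count)) sare := by
  intro k
  induction k with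
  | zero =>
    intro i count lists hk
    rw [mainerLoop]
    rw [dif_neg (by omega : ¬ (i < sale.length ∧ count < 100))]
    have : min (sale.length - i) (100 - count) = 0 := by omega
    simp [this]
  | succ n ih =>
    intro i count lists hk
    rw [mainerLoop]
    by_cases hc : i < sale.length ∧ count < 100
    · rw [dif_pos hc]
      simp only [hget, if_neg hmn]
      rw [ih (i + 1) (count + 1) (lists ++ [sare]) (by omega)]
      have hmin : min (sale.length - i) (100 - count)
          = min (sale.length - (i + 1)) (100 - (count + 1)) + 1 := by omega
      rw [hmin, List.replicate_succ, List.append_assoc]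
      rfl
    · rw [dif_neg hc]
      have : min (sale.length - i) (100 - count) = 0 := by omega
      simp [this]

-- ===== VERDICT (by name: the statement is the Claim_ definition above) =====
theorem mainer_spec : Claim_equal_mainer := by
  intro sale _hdom hpre
  unfold Spec_mainer mainer mainer_alt
  by_cases hnil : sale = []
  · subst hnil; rw [mainerLoop]; simp
  · rw [if_neg hnil]
    have hlen2 : 2 ≤ sale.length := by
      have h0 : sale.length ≠ 0 := by simpa [List.length_eq_zero_iff] using hnil
      have h1 : sale.length ≠ 1 := hpre
      omega
    have hget : PySem.List.pyGet? sale 1 = some (sale[1]'(by omega)) := by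
      have h := PySem.List.pyGet?_ofNat (n := 1) (xs := sale) (by omega)
      simpa using h
    rw [hget]
    set sare := sale[1]'(by omega) with hsare
    by_cases hmn : PySem.Str.lower sare = "m" ∨ PySem.Str.lower sare = "n"
    · simp only [if_pos hmn]
      exact mainerLoop_skip sale sare hget hmn _ 0 0 [] rfl
    · simp only [if_neg hmn]
      rw [mainerLoop_acc sale sare hget hmn _ 0 0 [] rfl]
      simp
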